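-- pv_equiv track=rewrite | github.com/pwang724/ALGORITHMS | ADNAN_AZIZ_ALGO/7/7.04.py | replace_and_delete
-- ===== SOURCE A (Python) =====
-- def replace_and_delete(str, size):
--     str = str[:size]
--     key = []
--     for i, alphabet in enumerate(str):
--         if alphabet == 'a':
--             key.append((i,'rep'))
--         if alphabet == 'b':
--             key.append((i,'del'))
--
--     result = ''
--     idx = 0
--     for k in key:
--         nextidx = k[0]
--         operation = k[1]
--
--         if operation == 'rep':
--             result += str[idx:nextidx] + 'dd'
--         if operation == 'del':
--             result += str[idx:nextidx]
--         idx = nextidx + 1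
--     result += str[idx:]
--
--     return result
-- ===== SOURCE B (Python) =====
-- def replace_and_delete(str, size):
--     parts = []
--     for ch in str[:size]:
--         if ch == 'a':
--             parts.append('dd')
--         elif ch == 'b':
--             continue
--         else:
--             parts.append(ch)
--     return ''.join(parts)
-- ===== Notes on version B (the rewrite author's own statement) =====
-- stated objective: simpler
-- what changed: Replaced A's two-phase scheme (build an (index, operation) table of 'a'/'b' positions, then stitch the untouched slices between consecutive operations) with a single direct per-character pass that emits 'dd', nothing, or the character itself, joined at the end.
import Mathlib
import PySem

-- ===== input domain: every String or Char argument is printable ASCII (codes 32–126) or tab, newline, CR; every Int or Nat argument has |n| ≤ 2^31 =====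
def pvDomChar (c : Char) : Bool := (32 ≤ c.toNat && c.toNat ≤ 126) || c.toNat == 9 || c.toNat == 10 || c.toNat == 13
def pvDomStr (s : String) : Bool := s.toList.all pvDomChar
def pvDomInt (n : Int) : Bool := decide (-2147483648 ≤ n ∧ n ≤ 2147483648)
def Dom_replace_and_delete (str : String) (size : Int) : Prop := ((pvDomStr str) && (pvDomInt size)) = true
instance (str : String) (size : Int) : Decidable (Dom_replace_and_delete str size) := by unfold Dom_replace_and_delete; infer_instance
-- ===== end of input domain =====

-- B replaces A's two-phase "collect (index, op) table, then stitch slices between ops"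
-- with a single direct per-character transform pass (simpler decomposition, same O(n) cost).


-- ===== PORT A =====
def replace_and_delete (str : String) (size : Int) : String :=
  let s := PySem.List.slice str.toList none (some size)
  let key : List (Int × String) := (PySem.List.enumerate s 0).foldl
      (fun acc p =>
        let acc := if p.2 = 'a' then acc ++ [(p.1, "rep")] else acc
        if p.2 = 'b' then acc ++ [(p.1, "del")] else acc) []
  let fin := key.foldl
      (fun (st : List Char × Int) k =>
        let nextidx := k.1
        let operation := k.2
        let r := if operation = "rep" then st.1 ++ PySem.List.slice s (some st.2) (some nextidx) ++ ['d', 'd'] else st.1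
        let r := if operation = "del" then r ++ PySem.List.slice s (some st.2) (some nextidx) else r
        (r, nextidx + 1)) ([], 0)
  String.ofList (fin.1 ++ PySem.List.slice s (some fin.2) none)

-- ===== PORT B =====
def replace_and_delete_alt (str : String) (size : Int) : String :=
  let s := PySem.List.slice str.toList none (some size)
  String.ofList (s.foldl
    (fun acc c =>
      if c = 'a' then acc ++ ['d', 'd']
      else if c = 'b' then acc
      else acc ++ [c]) [])

-- ===== PRECONDITION & SPEC =====
def Spec_replace_and_delete (str : String) (size : Int) (out : String) : Prop := out = replace_and_delete_alt str size
instance (str : String) (size : Int) (out : String) : Decidable (Spec_replace_and_delete str size out) := by unfold Spec_replace_and_delete; infer_instance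

-- ===== CLAIM (what is proved, stated in full; the proofs are below) =====
def Claim_equal_replace_and_delete : Prop := ∀ (str : String) (size : Int), Dom_replace_and_delete str size → Spec_replace_and_delete str size (replace_and_delete str size)

-- ===== LEMMAS AND PROOFS =====

-- the per-character key contribution in A's first loop
def pvG (p : Int × Char) : List (Int × String) :=
  (if p.2 = 'a' then [(p.1, "rep")] else []) ++ (if p.2 = 'b' then [(p.1, "del")] else [])

-- the per-character output contribution in B's loop
def pvF (c : Char) : List Char :=
  if c = 'a' then ['d', 'd'] else if c = 'b' then [] else [c]

-- A's second-loop step, named for the proofs (definitionally A's inline lambda)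
def pvStep (s : List Char) (st : List Char × Int) (k : Int × String) : List Char × Int :=
  let nextidx := k.1
  let operation := k.2
  let r := if operation = "rep" then st.1 ++ PySem.List.slice s (some st.2) (some nextidx) ++ ['d', 'd'] else st.1
  let r := if operation = "del" then r ++ PySem.List.slice s (some st.2) (some nextidx) else r
  (r, nextidx + 1)

lemma pvKeyStep_eq :
    (fun (acc : List (Int × String)) (p : Int × Char) =>
        let acc := if p.2 = 'a' then acc ++ [(p.1, "rep")] else acc
        if p.2 = 'b' then acc ++ [(p.1, "del")] else acc)
      = fun acc p => acc ++ pvG p := by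
  funext acc p
  simp only [pvG]
  split_ifs with h1 h2 h2 <;> simp_all

lemma pvBStep_eq :
    (fun (acc : List Char) (c : Char) =>
        if c = 'a' then acc ++ ['d', 'd']
        else if c = 'b' then acc
        else acc ++ [c])
      = fun acc c => acc ++ pvF c := by
  funext acc c
  simp only [pvF]
  split_ifs <;> simp

lemma pvSegExtend (s : List Char) (c : Char) (t : List Char) (i j : Nat)
    (hj : j ≤ i) (hd : s.drop i = c :: t) :
    (s.drop j).take (i + 1 - j) = (s.drop j).take (i - j) ++ [c] := by
  have hdd : (s.drop j).drop (i - j) = c :: t := by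
    rw [List.drop_drop]
    have h : j + (i - j) = i := by omega
    rw [h]; exact hd
  have hget : (s.drop j)[i - j]? = some c := by
    rw [← List.head?_drop, hdd]
    rfl
  have h1 : i + 1 - j = (i - j) + 1 := by omega
  rw [h1, List.take_add_one, hget]
  rfl

lemma pvLoop (s : List Char) (t : List Char) :
    ∀ (i j : Nat) (res : List Char), j ≤ i → s.drop i = t →
    (((PySem.List.enumerate t (i : Int)).flatMap pvG).foldl (pvStep s) (res, (j : Int))).1
      ++ PySem.List.slice s
          (some (((PySem.List.enumerate t (i : Int)).flatMap pvG).foldl (pvStep s) (res, (j : Int))).2) none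
      = res ++ (s.drop j).take (i - j) ++ t.flatMap pvF := by
  induction t with
  | nil =>
    intro i j res hj hd
    have hlen : s.length ≤ i := by
      have := List.drop_eq_nil_iff.mp hd
      omega
    have : (s.drop j).take (i - j) = s.drop j := by
      apply List.take_of_length_le
      simp
      omega
    simp [PySem.List.enumerate, PySem.List.slice_from_natCast, this]
  | cons c t ih =>
    intro i j res hj hd
    have hd' : s.drop (i + 1) = t := by
      have : s.drop (i + 1) = (s.drop i).drop 1 := by
        rw [List.drop_drop]
      rw [this, hd]
      rfl
    rw [PySem.List.enumerate_cons]
    by_cases ha : c = 'a'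
    · subst ha
      have hstep : pvStep s (res, (j : Int)) ((i : Int), "rep")
          = (res ++ (s.drop j).take (i - j) ++ ['d', 'd'], ((i + 1 : Nat) : Int)) := by
        simp [pvStep, PySem.List.slice_natCast]
      have hg : pvG ((i : Int), 'a') = [((i : Int), "rep")] := by simp [pvG]
      have hcast : ((i : Int) + 1) = ((i + 1 : Nat) : Int) := by push_cast; ring
      rw [List.flatMap_cons, hg, hcast, List.singleton_append, List.foldl_cons, hstep,
        ih (i + 1) (i + 1) _ le_rfl hd']
      simp [pvF]
    · by_cases hb : c = 'b'
      · subst hb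
        have hstep : pvStep s (res, (j : Int)) ((i : Int), "del")
            = (res ++ (s.drop j).take (i - j), ((i + 1 : Nat) : Int)) := by
          simp [pvStep, PySem.List.slice_natCast]
        have hg : pvG ((i : Int), 'b') = [((i : Int), "del")] := by simp [pvG]
        have hcast : ((i : Int) + 1) = ((i + 1 : Nat) : Int) := by push_cast; ring
        rw [List.flatMap_cons, hg, hcast, List.singleton_append, List.foldl_cons, hstep,
          ih (i + 1) (i + 1) _ le_rfl hd']
        simp [pvF]
      · have hg : pvG ((i : Int), c) = [] := by simp [pvG, ha, hb]
        have hcast : ((i : Int) + 1) = ((i + 1 : Nat) : Int) := by push_cast; ring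
        rw [List.flatMap_cons, hg, List.nil_append, hcast, ih (i + 1) j res (by omega) hd']
        rw [pvSegExtend s c t i j hj hd]
        simp [pvF, ha, hb]

-- ===== VERDICT (by name: the statement is the Claim_ definition above) =====
theorem replace_and_delete_spec : Claim_equal_replace_and_delete := by
  intro str size _
  unfold Spec_replace_and_delete replace_and_delete replace_and_delete_alt
  set s := PySem.List.slice str.toList none (some size) with hs
  simp only [pvKeyStep_eq, pvBStep_eq, PySem.List.foldl_append_eq_flatMap]
  have := pvLoop s s 0 0 [] le_rfl (by simp)
  simp only [Nat.cast_zero] at this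
  have hstep : (fun (st : List Char × Int) (k : Int × String) =>
        let nextidx := k.1
        let operation := k.2
        let r := if operation = "rep" then st.1 ++ PySem.List.slice s (some st.2) (some nextidx) ++ ['d', 'd'] else st.1
        let r := if operation = "del" then r ++ PySem.List.slice s (some st.2) (some nextidx) else r
        (r, nextidx + 1)) = pvStep s := rfl
  rw [hstep]
  simp only [List.nil_append]
  rw [this]
  simp
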